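-- pv_equiv track=rewrite | github.com/Ndugere/testing_python | hight.py | number_nums
-- ===== SOURCE A (Python) =====
-- def number_nums(nums: list) -> tuple:
--     x, y, h, w = None, None, 0, 0
--     for i, row in enumerate(nums):
--         if 0 in row:
--             if y is None:
--                 y = i
--             zero_indices = [j for j, val in enumerate(row) if val == 0]
--             left, right = min(zero_indices), max(zero_indices)
--             if x is None:
--                 x = left
--             w = max(w, right - x + 1)
--             h += 1
--     return (x, y), h, w
-- ===== SOURCE B (Python) =====
-- def number_nums(nums: list) -> tuple:
--     # Flatten the grid into one row-major list of zero-cell coordinates, then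
--     # read everything off that list: the first coordinate gives (y, x), the
--     # number of distinct rows gives h, and the global max column gives w.
--     zeros = [(i, j) for i, row in enumerate(nums) for j, v in enumerate(row) if v == 0]
--     if not zeros:
--         return (None, None), 0, 0
--     y, x = zeros[0]
--     h = len({i for i, _ in zeros})
--     w = max(j for _, j in zeros) - x + 1
--     return (x, y), h, w
-- ===== Notes on version B (the rewrite author's own statement) =====
-- stated objective: alternative
-- what changed: Replaced A's row loop with four interleaved running variables (x, y, running max w, counter h) by a coordinate-flattening algorithm: build one row-major list of all zero-cell coordinates, then read (y, x) off its first element, h as the size of the set of distinct rows, and w from one global max over the columns (no per-row min/max and no loop-carried state).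
import Mathlib
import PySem

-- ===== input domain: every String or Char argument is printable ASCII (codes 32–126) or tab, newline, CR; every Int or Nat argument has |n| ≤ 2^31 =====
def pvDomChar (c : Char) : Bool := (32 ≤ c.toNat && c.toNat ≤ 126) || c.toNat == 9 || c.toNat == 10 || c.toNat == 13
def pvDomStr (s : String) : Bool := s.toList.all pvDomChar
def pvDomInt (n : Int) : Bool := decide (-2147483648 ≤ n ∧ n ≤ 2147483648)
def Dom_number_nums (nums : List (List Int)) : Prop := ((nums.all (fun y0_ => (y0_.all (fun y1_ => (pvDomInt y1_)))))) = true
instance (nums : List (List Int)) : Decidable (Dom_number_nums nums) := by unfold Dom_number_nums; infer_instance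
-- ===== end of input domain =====

-- B replaces A's row loop with four running variables by a coordinate-flattening pass:
-- one row-major list of all zero-cell coordinates, from which (y, x) is the first
-- element, h the number of distinct rows (a set), and w one global max column
-- (objective: alternative algorithm, same O(n*m) cost).

-- ===== PORT A =====
-- helper: the zero-column indices of a row ([j for j, val in enumerate(row) if val == 0])
def zcolsOf (row : List Int) : List Int :=
  (PySem.List.enumerate row).filterMap (fun q => if q.2 = 0 then some q.1 else none)

def numberAStep (st : Option Int × Option Int × Int × Int) (p : Int × List Int) :
    Option Int × Option Int × Int × Int :=
  if p.2.contains 0 then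
    let y := some (st.2.1.getD p.1)
    let zs := zcolsOf p.2
    match PySem.List.min? zs (fun j => j), PySem.List.max? zs (fun j => j) with
    | some left, some right =>
      let xv := st.1.getD left
      (some xv, y, st.2.2.1 + 1, max st.2.2.2 (right - xv + 1))
    | _, _ => st   -- unreachable: zs is nonempty when 0 ∈ row
  else st

def number_nums (nums : List (List Int)) : (Option Int × Option Int) × Int × Int :=
  let st := (PySem.List.enumerate nums).foldl numberAStep (none, none, 0, 0)
  ((st.1, st.2.1), st.2.2.1, st.2.2.2)

-- ===== PORT B =====
-- zeros = [(i, j) for i, row in enumerate(nums) for j, v in enumerate(row) if v == 0]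
def number_nums_alt (nums : List (List Int)) : (Option Int × Option Int) × Int × Int :=
  let zeros := (PySem.List.enumerate nums).flatMap
    (fun p => (PySem.List.enumerate p.2).filterMap
      (fun q => if q.2 = 0 then some (p.1, q.1) else none))
  match zeros with
  | [] => ((none, none), 0, 0)
  | (y, x) :: _ =>
    let h := PySem.Set.len (PySem.Set.ofList (zeros.map Prod.fst))
    let w := (match PySem.List.max? (zeros.map Prod.snd) (fun j => j) with
              | some m => m - x + 1
              | none => 0)   -- unreachable: zeros is nonempty here
    ((some x, some y), h, w)

-- ===== PRECONDITION & SPEC =====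
def Spec_number_nums (nums : List (List Int)) (out : (Option Int × Option Int) × Int × Int) : Prop := out = number_nums_alt nums
instance (nums : List (List Int)) (out : (Option Int × Option Int) × Int × Int) : Decidable (Spec_number_nums nums out) := by unfold Spec_number_nums; infer_instance

-- ===== CLAIM (what is proved, stated in full; the proofs are below) =====
def Claim_equal_number_nums : Prop := ∀ (nums : List (List Int)), Dom_number_nums nums → Spec_number_nums nums (number_nums nums)

-- ===== LEMMAS AND PROOFS =====

-- per-row record used to describe A's loop: (row index, min zero col, max zero col)
def recOf (p : Int × List Int) : Option (Int × Int × Int) :=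
  let zs := zcolsOf p.2
  match PySem.List.min? zs (fun j => j), PySem.List.max? zs (fun j => j) with
  | some l, some r => some (p.1, l, r)
  | _, _ => none

-- the flattened zero coordinates of a list of (index, row) pairs
def zerosOf (ps : List (Int × List Int)) : List (Int × Int) :=
  ps.flatMap (fun p => (zcolsOf p.2).map (fun j => (p.1, j)))

lemma contains_iff_zcols (row : List Int) : row.contains 0 = true ↔ zcolsOf row ≠ [] := by
  simp only [zcolsOf, Ne, List.filterMap_eq_nil_iff, List.contains_eq_mem, decide_eq_true_eq]
  constructor
  · intro h hall
    obtain ⟨k, hk, hv⟩ := List.mem_iff_getElem.mp h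
    have := hall (0 + (k : Int), row[k]) (by
      rw [PySem.List.mem_enumerate_iff]; exact ⟨k, hk, rfl⟩)
    simp [hv] at this
  · intro h
    by_contra hc
    apply h
    intro q hq
    rw [PySem.List.mem_enumerate_iff] at hq
    obtain ⟨k, hk, rfl⟩ := hq
    have : row[k] ≠ 0 := fun he => hc (he ▸ List.getElem_mem hk)
    simp [this]

lemma zcols_pairwise (row : List Int) : (zcolsOf row).Pairwise (· < ·) := by
  unfold zcolsOf
  rw [List.pairwise_filterMap]
  apply (PySem.List.pairwise_lt_enumerate row 0).imp
  intro p q hpq x hx y hy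
  by_cases h1 : p.2 = 0 <;> simp [h1] at hx
  by_cases h2 : q.2 = 0 <;> simp [h2] at hy
  omega

lemma foldl_min_eq (cs : List Int) : ∀ a : Int, (∀ y ∈ cs, a ≤ y) → cs.foldl min a = a := by
  induction cs with
  | nil => intro a _; rfl
  | cons c cs ih =>
    intro a h
    simp only [List.foldl_cons]
    rw [min_eq_left (h c (by simp))]
    exact ih a (fun y hy => h y (by simp [hy]))

lemma foldl_max_shift (cs : List Int) : ∀ a c : Int, cs.foldl max (max a c) = max a (cs.foldl max c) := by
  induction cs with
  | nil => intro a c; rfl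
  | cons d cs ih =>
    intro a c
    simp only [List.foldl_cons]
    rw [max_assoc, ih]

-- recOf on a row whose zero columns are c :: cs
lemma recOf_cons {p : Int × List Int} {c : Int} {cs : List Int} (hz : zcolsOf p.2 = c :: cs) :
    recOf p = some (p.1, c, cs.foldl max c) := by
  have hmin : PySem.List.min? (zcolsOf p.2) (fun j => j) = some c := by
    rw [hz, PySem.List.min?_id_cons]
    congr 1
    apply foldl_min_eq
    have := zcols_pairwise p.2
    rw [hz] at this
    intro y hy
    exact le_of_lt ((List.pairwise_cons.mp this).1 y hy)
  have hmax : PySem.List.max? (zcolsOf p.2) (fun j => j) = some (cs.foldl max c) := by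
    rw [hz, PySem.List.max?_id_cons]
  simp [recOf, hmin, hmax]

lemma recOf_nil {p : Int × List Int} (hz : zcolsOf p.2 = []) : recOf p = none := by
  have h1 : (PySem.List.min? (zcolsOf p.2) (fun j => j)) = none := by
    rw [PySem.List.min?_eq_none_iff]; exact hz
  simp [recOf, h1]

-- A's fold once x and y are set
lemma foldA_some (ps : List (Int × List Int)) : ∀ (x0 i0 h w : Int),
    ps.foldl numberAStep (some x0, some i0, h, w) =
      (some x0, some i0, h + ((ps.filterMap recOf).length : Int),
        (ps.filterMap recOf).foldl (fun m t => max m (t.2.2 - x0 + 1)) w) := by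
  induction ps with
  | nil => intro x0 i0 h w; simp
  | cons p ps ih =>
    intro x0 i0 h w
    rcases hz : zcolsOf p.2 with _ | ⟨c, cs⟩
    · have hc : p.2.contains 0 = false := by
        rw [← Bool.not_eq_true, contains_iff_zcols, hz]; simp
      simp only [List.foldl_cons, List.filterMap_cons, recOf_nil hz, numberAStep, hc]
      simp [ih]
    · have hc : p.2.contains 0 = true := (contains_iff_zcols p.2).mpr (by simp [hz])
      have hr := recOf_cons hz
      have hmin : PySem.List.min? (zcolsOf p.2) (fun j => j) = some c := by
        have := hr; simp only [recOf] at this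
        rcases hm : PySem.List.min? (zcolsOf p.2) (fun j => j) with _ | l
        · rw [PySem.List.min?_eq_none_iff] at hm; simp [hm] at hz
        · rcases hM : PySem.List.max? (zcolsOf p.2) (fun j => j) with _ | r
          · rw [PySem.List.max?_eq_none_iff] at hM; simp [hM] at hz
          · simp [hm, hM] at this; simp [this.1]
      have hmax : PySem.List.max? (zcolsOf p.2) (fun j => j) = some (cs.foldl max c) := by
        rw [hz, PySem.List.max?_id_cons]
      simp only [List.foldl_cons, List.filterMap_cons, hr, numberAStep, hc, if_true, hmin, hmax]
      simp only [Option.getD_some, ih, List.length_cons, Prod.mk.injEq]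
      and_intros <;> first | trivial | (push_cast; ring)

-- A's fold from the initial state, in terms of the per-row records
lemma foldA_none (ps : List (Int × List Int)) :
    ps.foldl numberAStep (none, none, 0, 0) =
      match ps.filterMap recOf with
      | [] => (none, none, 0, 0)
      | (i0, l0, r0) :: rest =>
        (some l0, some i0, 1 + (rest.length : Int),
          rest.foldl (fun m t => max m (t.2.2 - l0 + 1)) (r0 - l0 + 1)) := by
  induction ps with
  | nil => simp
  | cons p ps ih =>
    rcases hz : zcolsOf p.2 with _ | ⟨c, cs⟩
    · have hc : p.2.contains 0 = false := by
        rw [← Bool.not_eq_true, contains_iff_zcols, hz]; simp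
      simp only [List.foldl_cons, List.filterMap_cons, recOf_nil hz, numberAStep, hc]
      simp [ih]
    · have hc : p.2.contains 0 = true := (contains_iff_zcols p.2).mpr (by simp [hz])
      have hmin : PySem.List.min? (zcolsOf p.2) (fun j => j) = some (cs.foldl min c) := by
        rw [hz, PySem.List.min?_id_cons]
      have hl : cs.foldl min c = c := by
        apply foldl_min_eq
        have := zcols_pairwise p.2
        rw [hz] at this
        intro y hy
        exact le_of_lt ((List.pairwise_cons.mp this).1 y hy)
      have hmax : PySem.List.max? (zcolsOf p.2) (fun j => j) = some (cs.foldl max c) := by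
        rw [hz, PySem.List.max?_id_cons]
      simp only [List.foldl_cons, List.filterMap_cons, recOf_cons hz, numberAStep, hc, if_true,
        hmin, hmax, hl]
      simp only [Option.getD_none]
      rw [foldA_some]
      have hmax0 : max (0 : Int) (cs.foldl max c - c + 1) = cs.foldl max c - c + 1 := by
        have : c ≤ cs.foldl max c := (PySem.List.le_foldl_max cs c).1
        omega
      simp [hmax0]

-- rewriting A's running shifted max as a plain max shifted at the end
lemma foldMaxShift (x0 : Int) (rs : List (Int × Int × Int)) : ∀ (a : Int),
    rs.foldl (fun m t => max m (t.2.2 - x0 + 1)) (a - x0 + 1) =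
      (rs.foldl (fun m t => max m t.2.2) a) - x0 + 1 := by
  induction rs with
  | nil => intro a; rfl
  | cons t ts ih =>
    intro a
    simp only [List.foldl_cons]
    have : max (a - x0 + 1) (t.2.2 - x0 + 1) = max a t.2.2 - x0 + 1 := by
      rcases le_total a t.2.2 with h | h
      · rw [max_eq_right h, max_eq_right (by omega)]
      · rw [max_eq_left h, max_eq_left (by omega)]
    rw [this, ih]

-- B's inner filterMap produces exactly the zero columns tagged with the row index
lemma zerosRow (i : Int) (row : List Int) :
    (PySem.List.enumerate row).filterMap (fun q => if q.2 = 0 then some (i, q.1) else none) =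
      (zcolsOf row).map (fun j => (i, j)) := by
  simp only [zcolsOf, List.map_filterMap]
  congr 1
  funext q
  by_cases h : q.2 = 0 <;> simp [h]

lemma zeros_nil_iff (ps : List (Int × List Int)) :
    zerosOf ps = [] ↔ ps.filterMap recOf = [] := by
  simp only [zerosOf, List.flatMap_eq_nil_iff, List.filterMap_eq_nil_iff, List.map_eq_nil_iff]
  constructor
  · intro h p hp
    exact recOf_nil (h p hp)
  · intro h p hp
    rcases hz : zcolsOf p.2 with _ | ⟨c, cs⟩
    · rfl
    · have := h p hp
      rw [recOf_cons hz] at this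
      simp at this

-- head of the flattened zero list = (row, min col) of the first zero row
lemma zeros_head (ps : List (Int × List Int)) (i0 l0 r0 : Int) (rest : List (Int × Int × Int))
    (h : ps.filterMap recOf = (i0, l0, r0) :: rest) :
    ∃ zt, zerosOf ps = (i0, l0) :: zt := by
  induction ps with
  | nil => simp at h
  | cons p ps ih =>
    rcases hz : zcolsOf p.2 with _ | ⟨c, cs⟩
    · rw [List.filterMap_cons, recOf_nil hz] at h
      obtain ⟨zt, hzt⟩ := ih h
      exact ⟨zt, by simp [zerosOf, hz]; simpa [zerosOf] using hzt⟩
    · rw [List.filterMap_cons, recOf_cons hz] at h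
      simp only [List.cons.injEq, Prod.mk.injEq] at h
      refine ⟨cs.map (fun j => (p.1, j)) ++ zerosOf ps, ?_⟩
      simp [zerosOf, hz, h.1.1, ← h.1.2.1]

-- distinct rows of the flattened zero list = rows of the records (needs distinct row indices)
lemma set_rows (ps : List (Int × List Int)) :
    ∀ s : PySem.Set Int, ps.Pairwise (fun p q => p.1 ≠ q.1) →
    (∀ p ∈ ps, s.contains p.1 = false) →
    ((zerosOf ps).map Prod.fst).foldl PySem.Set.add s = s ++ (ps.filterMap recOf).map (fun t => t.1) := by
  induction ps with
  | nil => intro s _ _; simp [zerosOf]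
  | cons p ps ih =>
    intro s hpw hs
    rcases hz : zcolsOf p.2 with _ | ⟨c, cs⟩
    · have : zerosOf (p :: ps) = zerosOf ps := by simp [zerosOf, hz]
      rw [this, List.filterMap_cons, recOf_nil hz]
      exact ih s (List.pairwise_cons.mp hpw).2 (fun q hq => hs q (by simp [hq]))
    · have hflat : zerosOf (p :: ps) = (c :: cs).map (fun j => (p.1, j)) ++ zerosOf ps := by
        simp [zerosOf, hz]
      have hnot : p.1 ∉ s := by simpa [List.contains_eq_mem] using hs p (by simp)
      have hadd : PySem.Set.add s p.1 = s ++ [p.1] := by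
        simp [PySem.Set.add, List.contains_eq_mem, hnot]
      have hreps : ∀ ds : List Int, (ds.map (fun _ : Int => p.1)).foldl PySem.Set.add (s ++ [p.1]) = s ++ [p.1] := by
        intro ds
        induction ds with
        | nil => rfl
        | cons d ds ihd =>
          simp only [List.map_cons, List.foldl_cons]
          have : PySem.Set.add (s ++ [p.1]) p.1 = s ++ [p.1] := by
            simp [PySem.Set.add, List.contains_eq_mem]
          rw [this, ihd]
      rw [hflat, List.map_append, List.foldl_append]
      have hmaps : ((c :: cs).map (fun j => (p.1, j))).map Prod.fst = (c :: cs).map (fun _ => p.1) := by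
        simp [List.map_map]
      rw [hmaps]
      simp only [List.map_cons, List.foldl_cons]
      rw [hadd, hreps cs]
      rw [List.filterMap_cons, recOf_cons hz]
      have hrec := (List.pairwise_cons.mp hpw).1
      have hihs : ∀ q ∈ ps, (s ++ [p.1]).contains q.1 = false := by
        intro q hq
        have h1 : q.1 ∉ s := by
          have := hs q (by simp [hq]); simpa [List.contains_eq_mem] using this
        have h2 : q.1 ≠ p.1 := fun he => (hrec q hq) he.symm
        simp [List.contains_eq_mem, h1, h2]
      rw [ih (s ++ [p.1]) (List.pairwise_cons.mp hpw).2 hihs]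
      simp

-- global max column over the flattened list = fold of per-row maxima
lemma foldMaxFlat (ps : List (Int × List Int)) : ∀ a : Int,
    (ps.flatMap (fun p => zcolsOf p.2)).foldl max a =
      (ps.filterMap recOf).foldl (fun m t => max m t.2.2) a := by
  induction ps with
  | nil => intro a; rfl
  | cons p ps ih =>
    intro a
    rcases hz : zcolsOf p.2 with _ | ⟨c, cs⟩
    · simp [hz, recOf_nil hz, ih]
    · simp only [List.flatMap_cons, hz, List.filterMap_cons, recOf_cons hz,
        List.foldl_append, List.foldl_cons]
      rw [foldl_max_shift, ih]

-- max? of the columns of the flattened list, when the records are nonempty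
lemma maxCols (ps : List (Int × List Int)) (i0 l0 r0 : Int) (rest : List (Int × Int × Int))
    (h : ps.filterMap recOf = (i0, l0, r0) :: rest) :
    PySem.List.max? ((zerosOf ps).map Prod.snd) (fun j => j) =
      some (rest.foldl (fun m t => max m t.2.2) r0) := by
  induction ps with
  | nil => simp at h
  | cons p ps ih =>
    rcases hz : zcolsOf p.2 with _ | ⟨c, cs⟩
    · rw [List.filterMap_cons, recOf_nil hz] at h
      have : zerosOf (p :: ps) = zerosOf ps := by simp [zerosOf, hz]
      rw [this]; exact ih h
    · rw [List.filterMap_cons, recOf_cons hz] at h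
      simp only [List.cons.injEq, Prod.mk.injEq] at h
      have hflat : (zerosOf (p :: ps)).map Prod.snd = (c :: cs) ++ (ps.flatMap (fun q => zcolsOf q.2)) := by
        simp [zerosOf, List.map_flatMap, List.map_map, hz]
      rw [hflat]
      rw [List.cons_append, PySem.List.max?_id_cons]
      rw [List.foldl_append, foldMaxFlat]
      rw [← h.2, h.1.2.2]

-- ===== VERDICT (by name: the statement is the Claim_ definition above) =====
theorem number_nums_spec : Claim_equal_number_nums := by
  intro nums _
  unfold Spec_number_nums number_nums number_nums_alt
  have hzr : (PySem.List.enumerate nums).flatMap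
      (fun p => (PySem.List.enumerate p.2).filterMap
        (fun q => if q.2 = 0 then some (p.1, q.1) else none)) = zerosOf (PySem.List.enumerate nums) := by
    unfold zerosOf
    apply List.flatMap_congr
    intro p _
    exact zerosRow p.1 p.2
  simp only [hzr]
  rw [foldA_none]
  rcases hrec : (PySem.List.enumerate nums).filterMap recOf with _ | ⟨⟨i0, l0, r0⟩, rest⟩
  · have hnil : zerosOf (PySem.List.enumerate nums) = [] := (zeros_nil_iff _).mpr hrec
    rw [hnil]
  · obtain ⟨zt, hzt⟩ := zeros_head _ i0 l0 r0 rest hrec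
    rw [hzt]
    have hpw : (PySem.List.enumerate nums).Pairwise (fun p q => p.1 ≠ q.1) :=
      (PySem.List.pairwise_lt_enumerate nums 0).imp (fun h => ne_of_lt h)
    have hset := set_rows (PySem.List.enumerate nums) PySem.Set.empty hpw
      (fun p _ => by simp [PySem.Set.empty, List.contains_eq_mem])
    have hmax := maxCols (PySem.List.enumerate nums) i0 l0 r0 rest hrec
    rw [hzt] at hset hmax
    simp only [PySem.Set.ofList, PySem.Set.len, hset, hmax, hrec]
    rw [foldMaxShift]
    simp only [PySem.Set.empty, List.nil_append, List.map_cons, List.length_cons,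
      List.length_map, Prod.mk.injEq]
    and_intros <;> first | trivial | (push_cast; ring)
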